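-- pv_equiv track=rewrite | github.com/malelou/advent-of-code-2019 | day4/part1/puzzle.py | solve
-- ===== SOURCE A (Python) =====
-- def solve(data):
--     validValues = []
--     for value in range(data[0], data[1] + 1):
--         strValue = str(value)
--         i = 1
--         hasDouble = False
--         hasDecrease = False
--         while(i < len(strValue)):
--             if(strValue[i] < strValue[i - 1]):
--                 hasDecrease = True
--             if(strValue[i] == strValue[i - 1]):
--                 hasDouble = True
--             i += 1
--         if(hasDouble and not hasDecrease):
--             validValues.append(value)
--     return len(validValues)
-- ===== SOURCE B (Python) =====
-- def solve(data):
--     # idiomatic: a number qualifies iff its decimal string is already sorted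
--     # and contains a repeated character; count with a generator expression
--     return sum(
--         1
--         for value in range(data[0], data[1] + 1)
--         if (s := str(value)) == "".join(sorted(s)) and len(set(s)) < len(s)
--     )
-- ===== Notes on version B (the rewrite author's own statement) =====
-- stated objective: idiomatic
-- what changed: The per-number index loop with two mutable flags is replaced by the idiomatic characterization s == ''.join(sorted(s)) and len(set(s)) < len(s), and the result is counted with a generator sum instead of building a list and taking its length.
-- outside the precondition, e.g. on solve([5]): A raises IndexError, B raises IndexError; on solve([0]): A raises IndexError, B raises IndexError; on solve([1]): A raises IndexError, B raises IndexError
import Mathlib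
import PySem

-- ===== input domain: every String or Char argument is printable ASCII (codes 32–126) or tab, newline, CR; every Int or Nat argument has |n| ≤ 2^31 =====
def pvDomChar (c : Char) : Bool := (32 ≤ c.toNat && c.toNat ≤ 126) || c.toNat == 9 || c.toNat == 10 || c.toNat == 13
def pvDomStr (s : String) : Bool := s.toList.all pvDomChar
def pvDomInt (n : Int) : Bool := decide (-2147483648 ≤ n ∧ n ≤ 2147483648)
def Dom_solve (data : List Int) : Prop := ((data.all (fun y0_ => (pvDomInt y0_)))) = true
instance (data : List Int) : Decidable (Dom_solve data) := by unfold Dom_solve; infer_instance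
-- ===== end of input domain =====

-- B replaces A's index-scanning flag loop by the idiomatic per-number test
-- s == ''.join(sorted(s)) and len(set(s)) < len(s), counted with a generator sum.

-- ===== PORT A =====
-- the while-loop of A: walks the tail of the digit string carrying the previous
-- character and the two flags (hasDouble, hasDecrease)
def solveWhile : List Char → Char → Bool → Bool → Bool × Bool
  | [], _, hasDouble, hasDecrease => (hasDouble, hasDecrease)
  | c :: rest, prev, hasDouble, hasDecrease =>
      solveWhile rest c (hasDouble || (c == prev)) (hasDecrease || (c < prev))

def solve (data : List Int) : Int :=
  match PySem.List.pyGet? data 0, PySem.List.pyGet? data 1 with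
  | some a, some b =>
      let validValues : List Int :=
        (PySem.List.pyRange a (b + 1) 1).foldl (fun acc value =>
          let strValue := PySem.Int.toChars value
          let r :=
            match strValue with
            | [] => (false, false)
            | c0 :: rest => solveWhile rest c0 false false
          if r.1 && !r.2 then acc ++ [value] else acc) []
      (validValues.length : Int)
  | _, _ => 0   -- unreachable under Pre_solve (Python raises IndexError)

-- ===== PORT B =====
def solve_alt (data : List Int) : Int :=
  match PySem.List.pyGet? data 0 with
  | none => 0   -- unreachable under Pre_solve (Python raises IndexError)
  | some a =>
    match PySem.List.pyGet? data 1 with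
    | none => 0   -- unreachable under Pre_solve (Python raises IndexError)
    | some b =>
      (PySem.List.pyRange a (b + 1) 1).foldl (fun acc value =>
        let s := PySem.Int.toChars value
        if s = PySem.List.sorted s (fun c => c) false ∧
            (PySem.Set.ofList s).length < s.length
        then acc + 1 else acc) 0

-- ===== PRECONDITION & SPEC =====
-- Python A raises IndexError on data[0]/data[1] when data has fewer than two elements
def Pre_solve (data : List Int) : Prop := 2 ≤ data.length
instance (data : List Int) : Decidable (Pre_solve data) := by unfold Pre_solve; infer_instance
def pvWitness_solve : List Int := [1, 30]

def Spec_solve (data : List Int) (out : Int) : Prop := out = solve_alt data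
instance (data : List Int) (out : Int) : Decidable (Spec_solve data out) := by unfold Spec_solve; infer_instance

-- ===== CLAIM (what is proved, stated in full; the proofs are below) =====
def Claim_equal_solve : Prop := ∀ (data : List Int), Dom_solve data → Pre_solve data → Spec_solve data (solve data)

-- ===== LEMMAS AND PROOFS =====

-- boolean "some adjacent pair is equal" / "some adjacent pair decreases",
-- seen from a previous character
def hasAdjEq : Char → List Char → Bool
  | _, [] => false
  | p, c :: r => (c == p) || hasAdjEq c r

def hasAdjDec : Char → List Char → Bool
  | _, [] => false
  | p, c :: r => (c < p) || hasAdjDec c r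

theorem solveWhile_eq (r : List Char) : ∀ (p : Char) (d dec : Bool),
    solveWhile r p d dec = (d || hasAdjEq p r, dec || hasAdjDec p r) := by
  induction r with
  | nil => intro p d dec; simp [solveWhile, hasAdjEq, hasAdjDec]
  | cons c t ih =>
      intro p d dec
      simp [solveWhile, hasAdjEq, hasAdjDec, ih, Bool.or_assoc]

theorem hasAdjDec_false_iff (r : List Char) : ∀ p : Char,
    hasAdjDec p r = false ↔ List.IsChain (· ≤ ·) (p :: r) := by
  induction r with
  | nil => intro p; simp [hasAdjDec]
  | cons c t ih =>
      intro p
      rw [List.isChain_cons_cons]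
      simp [hasAdjDec, ih c]

theorem hasAdjEq_not_nodup (r : List Char) : ∀ p : Char,
    hasAdjEq p r = true → ¬ (p :: r).Nodup := by
  induction r with
  | nil => intro p h; simp [hasAdjEq] at h
  | cons c t ih =>
      intro p h hnd
      simp only [hasAdjEq, Bool.or_eq_true, beq_iff_eq] at h
      rcases h with h | h
      · subst h; simp at hnd
      · exact ih c h (hnd.of_cons)

theorem nodup_of_no_adjEq (r : List Char) : ∀ p : Char,
    hasAdjEq p r = false → List.IsChain (· ≤ ·) (p :: r) → (p :: r).Nodup := by
  induction r with
  | nil => intro p _ _; simp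
  | cons c t ih =>
      intro p h hch
      simp only [hasAdjEq, Bool.or_eq_false_iff, beq_eq_false_iff_ne, ne_eq] at h
      rcases h with ⟨hne, ht⟩
      rcases (List.isChain_cons_cons.mp hch) with ⟨hpc, hct⟩
      have hnd : (c :: t).Nodup := ih c ht hct
      have hlt : p < c := lt_of_le_of_ne hpc (fun e => hne e.symm)
      have hall : ∀ x ∈ t, c ≤ x := by
        have hpw := (List.isChain_iff_pairwise.mp hct)
        intro x hx
        exact List.rel_of_pairwise_cons hpw hx
      refine List.nodup_cons.mpr ⟨?_, hnd⟩
      intro hmem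
      simp only [List.mem_cons] at hmem
      rcases hmem with rfl | hmem
      · exact absurd rfl (ne_of_lt hlt)
      · exact absurd rfl (ne_of_lt (lt_of_lt_of_le hlt (hall _ hmem)))

theorem sorted_eq_self_iff (s : List Char) :
    s = PySem.List.sorted s (fun c => c) false ↔ s.Pairwise (· ≤ ·) := by
  constructor
  · intro h
    have := PySem.List.sorted_pairwise s (fun c => c)
    rw [← h] at this
    exact this
  · intro h
    exact (PySem.List.sorted_eq_self_of_pairwise s (fun c => c) h).symm

theorem setlen_lt_iff_not_nodup (s : List Char) :
    (PySem.Set.ofList s).length < s.length ↔ ¬ s.Nodup := by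
  have hperm : (PySem.Set.ofList s).Perm s.dedup := by
    apply (List.perm_ext_iff_of_nodup (PySem.Set.nodup_ofList s) s.nodup_dedup).mpr
    intro x
    rw [PySem.Set.mem_ofList, List.mem_dedup]
  rw [hperm.length_eq]
  constructor
  · intro hlt hnd
    rw [List.Nodup.dedup hnd] at hlt
    omega
  · intro hnd
    have hsub : s.dedup.Sublist s := s.dedup_sublist
    have hle := hsub.length_le
    rcases lt_or_eq_of_le hle with h | h
    · exact h
    · exact absurd (List.dedup_eq_self.mp (hsub.eq_of_length h)) hnd

-- the per-number predicates of A and B agree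
theorem cond_iff (s : List Char) :
    (((match s with
       | [] => ((false : Bool), (false : Bool))
       | c0 :: rest => solveWhile rest c0 false false).1 &&
      !(match s with
       | [] => ((false : Bool), (false : Bool))
       | c0 :: rest => solveWhile rest c0 false false).2) = true) ↔
    (s = PySem.List.sorted s (fun c => c) false ∧
     (PySem.Set.ofList s).length < s.length) := by
  cases s with
  | nil => simp [PySem.List.sorted]
  | cons c0 rest =>
      show ((solveWhile rest c0 false false).1 &&
            !(solveWhile rest c0 false false).2) = true ↔ _
      rw [solveWhile_eq]
      simp only [Bool.false_or, Bool.and_eq_true, Bool.not_eq_eq_eq_not,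
        Bool.not_true]
      constructor
      · rintro ⟨hEq, hDec⟩
        have hch := (hasAdjDec_false_iff rest c0).mp hDec
        have hpw : (c0 :: rest).Pairwise (· ≤ ·) := List.isChain_iff_pairwise.mp hch
        refine ⟨(sorted_eq_self_iff _).mpr hpw, ?_⟩
        exact (setlen_lt_iff_not_nodup _).mpr (hasAdjEq_not_nodup rest c0 hEq)
      · rintro ⟨hs, hl⟩
        have hpw := (sorted_eq_self_iff _).mp hs
        have hch : List.IsChain (· ≤ ·) (c0 :: rest) := List.isChain_iff_pairwise.mpr hpw
        refine ⟨?_, (hasAdjDec_false_iff rest c0).mpr hch⟩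
        by_contra hne
        have hf : hasAdjEq c0 rest = false := by
          cases h : hasAdjEq c0 rest
          · rfl
          · exact absurd h hne
        exact (setlen_lt_iff_not_nodup _).mp hl (nodup_of_no_adjEq rest c0 hf hch)

-- counting by appending to a list then taking len equals counting with +1
theorem foldl_count (l : List Int) (pA pB : Int → Prop)
    [DecidablePred pA] [DecidablePred pB] (hp : ∀ v, pA v ↔ pB v) :
    ∀ (accL : List Int) (accN : Int), accN = accL.length →
    ((l.foldl (fun acc v => if pA v then acc ++ [v] else acc) accL).length : Int)
      = l.foldl (fun acc v => if pB v then acc + 1 else acc) accN := by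
  induction l with
  | nil => intro accL accN h; simp [h]
  | cons x t ih =>
      intro accL accN h
      simp only [List.foldl_cons]
      by_cases hx : pA x
      · rw [if_pos hx, if_pos ((hp x).mp hx)]
        exact ih _ _ (by simp [h])
      · rw [if_neg hx, if_neg (fun hb => hx ((hp x).mpr hb))]
        exact ih _ _ h

-- ===== VERDICT (by name: the statement is the Claim_ definition above) =====
theorem solve_spec : Claim_equal_solve := by
  intro data _ hpre
  unfold Spec_solve solve solve_alt
  match data, hpre with
  | d0 :: d1 :: rest, _ =>
    have hn : (0 : Int) ≤ (rest.length : Int) + 1 := by positivity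
    have h0 : PySem.List.pyGet? (d0 :: d1 :: rest) 0 = some d0 := by
      simp [PySem.List.pyGet?, PySem.List.pyIdx?, hn]
    have h1 : PySem.List.pyGet? (d0 :: d1 :: rest) 1 = some d1 := by
      simp [PySem.List.pyGet?, PySem.List.pyIdx?]
    rw [h0, h1]
    exact foldl_count _ _ _ (fun v => cond_iff (PySem.Int.toChars v)) [] 0 rfl
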